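-- pv_equiv track=rewrite | github.com/OpenNumismat/open-numismat | OpenNumismat/EditCoinDialog/YearCalculator.py | fromGregorian
-- ===== SOURCE A (Python) =====
-- def fromGregorian(year):
--     _GEMATRIOS = {
--         1: 'א', 2: 'ב', 3: 'ג', 4: 'ד', 5: 'ה', 6: 'ו', 7: 'ז', 8: 'ח', 9: 'ט',
--         10: 'י', 20: 'כ', 30: 'ל', 40: 'מ', 50: 'נ', 60: 'ס', 70: 'ע', 80: 'פ',
--         90: 'צ', 100: 'ק', 200: 'ר', 300: 'ש', 400: 'ת'
--     }
--
--     num = year + 3760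
--
--     ones = num % 10
--     tens = num % 100 - ones
--     hundreds = num % 1000 - tens - ones
--     four_hundreds = ''.join(['ת' for _ in range(hundreds // 400)])
--     ones = _GEMATRIOS.get(ones, '')
--     tens = _GEMATRIOS.get(tens, '')
--     hundreds = _GEMATRIOS.get(hundreds % 400, '')
--     if 5708 > num or num > 5740:
--         thousands = num // 1000
--         thousands = _GEMATRIOS.get(thousands, '')
--     else:
--         thousands = ''
--     letters = thousands + four_hundreds + hundreds + tens + ones
--
--     letters = letters.replace('יה', 'טו').replace('יו', 'טז')
--
--     if len(letters) > 1:
--         letters = letters[:-1] + '״' + letters[-1]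
--
--     return letters
-- ===== SOURCE B (Python) =====
-- _VALS = [
--     (400, 'ת'), (300, 'ש'), (200, 'ר'), (100, 'ק'),
--     (90, 'צ'), (80, 'פ'), (70, 'ע'), (60, 'ס'), (50, 'נ'),
--     (40, 'מ'), (30, 'ל'), (20, 'כ'), (10, 'י'),
--     (9, 'ט'), (8, 'ח'), (7, 'ז'), (6, 'ו'), (5, 'ה'),
--     (4, 'ד'), (3, 'ג'), (2, 'ב'), (1, 'א'),
-- ]
-- _GEM = dict((v, c) for v, c in _VALS)
--
--
-- def fromGregorian(year):
--     num = year + 3760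
--
--     # greedy subtraction over the gematria values, largest first
--     r = num % 1000
--     body = ''
--     for v, c in _VALS:
--         while r >= v:
--             body += c
--             r -= v
--
--     if 5708 > num or num > 5740:
--         thousands = _GEM.get(num // 1000, '')
--     else:
--         thousands = ''
--
--     letters = thousands + body
--     letters = letters.replace('יה', 'טו').replace('יו', 'טז')
--     if len(letters) > 1:
--         letters = letters[:-1] + '״' + letters[-1]
--     return letters
-- ===== Notes on version B (the rewrite author's own statement) =====
-- stated objective: alternative
-- what changed: Replaces the modular digit extraction (ones/tens/hundreds/four-hundreds via % and //) with a single greedy subtraction loop over the gematria values in descending order; thousands, the two replacements and the gershayim insertion are kept.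
import Mathlib
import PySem

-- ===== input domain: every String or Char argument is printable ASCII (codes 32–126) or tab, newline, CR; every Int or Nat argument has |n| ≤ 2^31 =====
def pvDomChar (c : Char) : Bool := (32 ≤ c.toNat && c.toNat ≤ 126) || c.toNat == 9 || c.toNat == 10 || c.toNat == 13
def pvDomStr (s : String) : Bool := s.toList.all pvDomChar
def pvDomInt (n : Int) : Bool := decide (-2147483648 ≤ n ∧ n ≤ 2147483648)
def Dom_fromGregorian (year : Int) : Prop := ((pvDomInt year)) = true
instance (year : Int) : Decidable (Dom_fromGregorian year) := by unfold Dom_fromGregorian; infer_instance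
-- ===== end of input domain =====

-- B replaces A's modular digit extraction with one greedy subtraction loop over the
-- gematria values in descending order; thousands/replacements/gershayim are unchanged.

-- ===== PORT A =====
-- the _GEMATRIOS dict (values kept as List Char; strings are proved on the list side)
def pvGematrios : PySem.Dict Int (List Char) :=
  PySem.Dict.ofList [(1, ['א']), (2, ['ב']), (3, ['ג']), (4, ['ד']), (5, ['ה']),
    (6, ['ו']), (7, ['ז']), (8, ['ח']), (9, ['ט']),
    (10, ['י']), (20, ['כ']), (30, ['ל']), (40, ['מ']), (50, ['נ']), (60, ['ס']),
    (70, ['ע']), (80, ['פ']), (90, ['צ']), (100, ['ק']), (200, ['ר']), (300, ['ש']), (400, ['ת'])]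

def fromGregorian (year : Int) : String :=
  let num := year + 3760
  let ones := PySem.Int.mod num 10
  let tens := PySem.Int.mod num 100 - ones
  let hundreds := PySem.Int.mod num 1000 - tens - ones
  let four_hundreds := PySem.Chars.join []
    ((PySem.List.pyRange 0 (PySem.Int.floordiv hundreds 400) 1).map (fun _ => ['ת']))
  let onesS := pvGematrios.getD ones []
  let tensS := pvGematrios.getD tens []
  let hundredsS := pvGematrios.getD (PySem.Int.mod hundreds 400) []
  let thousands :=
    if 5708 > num ∨ num > 5740 then pvGematrios.getD (PySem.Int.floordiv num 1000) [] else []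
  let letters := thousands ++ four_hundreds ++ hundredsS ++ tensS ++ onesS
  let letters := PySem.Chars.replace (PySem.Chars.replace letters ['י','ה'] ['ט','ו']) ['י','ו'] ['ט','ז']
  let letters :=
    if 1 < PySem.List.len letters then
      PySem.List.slice letters none (some (-1)) ++ ['״'] ++
        (match PySem.List.pyGet? letters (-1) with | some c => [c] | none => [])
    else letters
  String.ofList letters

-- ===== PORT B =====
-- the _VALS list: gematria values in descending order
def pvVals : List (Int × Char) :=
  [(400, 'ת'), (300, 'ש'), (200, 'ר'), (100, 'ק'),
   (90, 'צ'), (80, 'פ'), (70, 'ע'), (60, 'ס'), (50, 'נ'),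
   (40, 'מ'), (30, 'ל'), (20, 'כ'), (10, 'י'),
   (9, 'ט'), (8, 'ח'), (7, 'ז'), (6, 'ו'), (5, 'ה'),
   (4, 'ד'), (3, 'ג'), (2, 'ב'), (1, 'א')]

-- _GEM = dict(_VALS)
def pvGem : PySem.Dict Int (List Char) :=
  PySem.Dict.ofList (pvVals.map (fun p => (p.1, [p.2])))

-- the inner 'while r >= v: body += c; r -= v' loop (fuel = r.toNat + 1 suffices: each
-- iteration lowers r by v ≥ 1); returns the appended letters and the final r
def pvWhileSub (v : Int) (c : Char) : Nat → Int → List Char × Int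
  | 0, r => ([], r)
  | fuel + 1, r =>
      if v ≤ r then
        let p := pvWhileSub v c fuel (r - v)
        (c :: p.1, p.2)
      else ([], r)

-- the 'for v, c in _VALS' loop: state (body, r)
def pvGreedy (r : Int) : List Char :=
  (pvVals.foldl
    (fun (st : List Char × Int) (p : Int × Char) =>
      let q := pvWhileSub p.1 p.2 (st.2.toNat + 1) st.2
      (st.1 ++ q.1, q.2))
    ([], r)).1

def fromGregorian_alt (year : Int) : String :=
  let num := year + 3760
  let body := pvGreedy (PySem.Int.mod num 1000)
  let thousands :=
    if 5708 > num ∨ num > 5740 then pvGem.getD (PySem.Int.floordiv num 1000) [] else []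
  let letters := thousands ++ body
  let letters := PySem.Chars.replace (PySem.Chars.replace letters ['י','ה'] ['ט','ו']) ['י','ו'] ['ט','ז']
  let letters :=
    if 1 < PySem.List.len letters then
      PySem.List.slice letters none (some (-1)) ++ ['״'] ++
        (match PySem.List.pyGet? letters (-1) with | some c => [c] | none => [])
    else letters
  String.ofList letters

-- ===== PRECONDITION & SPEC =====
def Spec_fromGregorian (year : Int) (out : String) : Prop := out = fromGregorian_alt year
instance (year : Int) (out : String) : Decidable (Spec_fromGregorian year out) := by unfold Spec_fromGregorian; infer_instance

-- ===== CLAIM (what is proved, stated in full; the proofs are below) =====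
def Claim_equal_fromGregorian : Prop := ∀ (year : Int), Dom_fromGregorian year → Spec_fromGregorian year (fromGregorian year)

-- ===== LEMMAS AND PROOFS =====

-- A's four digit pieces, as a function of num
def pvDigitsA (num : Int) : List Char :=
  let ones := PySem.Int.mod num 10
  let tens := PySem.Int.mod num 100 - ones
  let hundreds := PySem.Int.mod num 1000 - tens - ones
  PySem.Chars.join []
      ((PySem.List.pyRange 0 (PySem.Int.floordiv hundreds 400) 1).map (fun _ => ['ת']))
    ++ (pvGematrios.getD (PySem.Int.mod hundreds 400) []
    ++ (pvGematrios.getD tens []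
    ++ pvGematrios.getD ones []))

-- shared tail: thousands letter, then the replacements and the gershayim insertion
def pvThousands (num : Int) (d : PySem.Dict Int (List Char)) : List Char :=
  if 5708 > num ∨ num > 5740 then d.getD (PySem.Int.floordiv num 1000) [] else []

def pvFinish (letters0 : List Char) : String :=
  let letters := PySem.Chars.replace (PySem.Chars.replace letters0 ['י','ה'] ['ט','ו']) ['י','ו'] ['ט','ז']
  let letters :=
    if 1 < PySem.List.len letters then
      PySem.List.slice letters none (some (-1)) ++ ['״'] ++
        (match PySem.List.pyGet? letters (-1) with | some c => [c] | none => [])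
    else letters
  String.ofList letters

theorem fromGregorian_eq (year : Int) :
    fromGregorian year = pvFinish (pvThousands (year + 3760) pvGematrios ++ pvDigitsA (year + 3760)) := by
  simp only [fromGregorian, pvFinish, pvThousands, pvDigitsA, List.append_assoc]

theorem fromGregorian_alt_eq (year : Int) :
    fromGregorian_alt year =
      pvFinish (pvThousands (year + 3760) pvGem ++ pvGreedy (PySem.Int.mod (year + 3760) 1000)) := by
  simp only [fromGregorian_alt, pvFinish, pvThousands]

-- the two dicts give the same lookup at every key
theorem pvGem_keys : pvGem.keys = [400, 300, 200, 100, 90, 80, 70, 60, 50, 40, 30, 20, 10, 9, 8, 7, 6, 5, 4, 3, 2, 1] := by decide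

theorem pvGematrios_keys : pvGematrios.keys = [1, 2, 3, 4, 5, 6, 7, 8, 9, 10, 20, 30, 40, 50, 60, 70, 80, 90, 100, 200, 300, 400] := by decide

theorem pvGem_getD (k : Int) : pvGem.getD k [] = pvGematrios.getD k [] := by
  by_cases h : k ∈ pvGem.keys
  · rw [pvGem_keys] at h
    fin_cases h <;> rfl
  · have h1 : pvGem.contains k = false := by
      rw [PySem.Dict.contains_eq_decide_mem_keys]
      simpa using h
    have h2 : pvGematrios.contains k = false := by
      rw [PySem.Dict.contains_eq_decide_mem_keys, pvGematrios_keys]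
      rw [pvGem_keys] at h
      simp only [List.mem_cons, List.not_mem_nil, or_false] at h ⊢
      simp only [decide_eq_false_iff_not]
      tauto
    rw [PySem.Dict.getD_of_not_contains pvGem [] h1, PySem.Dict.getD_of_not_contains pvGematrios [] h2]

theorem pvThousands_eq (num : Int) : pvThousands num pvGem = pvThousands num pvGematrios := by
  unfold pvThousands
  rw [pvGem_getD]

-- A's digit pieces depend on num only through num % 1000
theorem pvDigitsA_mod (num : Int) : pvDigitsA num = pvDigitsA (PySem.Int.mod num 1000) := by
  have h10 := PySem.Int.mod_eq_emod_of_pos (a := num) (b := 10) (by norm_num)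
  have h100 := PySem.Int.mod_eq_emod_of_pos (a := num) (b := 100) (by norm_num)
  have h1000 := PySem.Int.mod_eq_emod_of_pos (a := num) (b := 1000) (by norm_num)
  have h10' := PySem.Int.mod_eq_emod_of_pos (a := PySem.Int.mod num 1000) (b := 10) (by norm_num)
  have h100' := PySem.Int.mod_eq_emod_of_pos (a := PySem.Int.mod num 1000) (b := 100) (by norm_num)
  have h1000' := PySem.Int.mod_eq_emod_of_pos (a := PySem.Int.mod num 1000) (b := 1000) (by norm_num)
  unfold pvDigitsA
  rw [h10', h100', h1000', h10, h100, h1000]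
  have e10 : (num % 1000) % 10 = num % 10 := by omega
  have e100 : (num % 1000) % 100 = num % 100 := by omega
  have e1000 : (num % 1000) % 1000 = num % 1000 := by omega
  rw [e10, e100, e1000]

-- the greedy loop produces exactly A's digit pieces, for every residue mod 1000
set_option maxRecDepth 100000 in
set_option maxHeartbeats 2000000 in
theorem pvGreedy_eq_digits : ∀ n : Nat, n < 1000 → pvGreedy (n : Int) = pvDigitsA (n : Int) := by
  decide

theorem greedy_eq (num : Int) : pvGreedy (PySem.Int.mod num 1000) = pvDigitsA num := by
  have hnn : 0 ≤ PySem.Int.mod num 1000 := PySem.Int.mod_nonneg num (by norm_num)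
  have hlt : PySem.Int.mod num 1000 < 1000 := PySem.Int.mod_lt num (by norm_num)
  have hcast : PySem.Int.mod num 1000 = ((PySem.Int.mod num 1000).toNat : Int) := by omega
  rw [pvDigitsA_mod, hcast, pvGreedy_eq_digits (PySem.Int.mod num 1000).toNat (by omega)]

-- ===== VERDICT (by name: the statement is the Claim_ definition above) =====
theorem fromGregorian_spec : Claim_equal_fromGregorian := by
  intro year _
  show fromGregorian year = fromGregorian_alt year
  rw [fromGregorian_eq, fromGregorian_alt_eq, pvThousands_eq, greedy_eq]
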